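-- pv_equiv track=rewrite | github.com/VictorBertolini/MercadoPago-Excel-Formatter | Functions.py | construct_statement_lines
-- ===== SOURCE A (Python) =====
-- def find_commas(book):
--     positions = []
--     for i, char in enumerate(book):
--         if char == ',':
--             positions.append(i)
--
--     return positions
--
-- def text_to_book(text):
--     sep = ""
--     book = sep.join(text)
--     book = book.replace('\n', ' ')
--     return book
--
-- def strip_lines(lines):
--     new_lines = []
--     for single_line in lines:
--         new_lines.append(single_line.strip())
--
--     return new_lines
--
-- def construct_statement_lines(text):
--     statement_lines = []
--     book = text_to_book(text)
--     comma_position = find_commas(book)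
--     init_position = 0
--
--     # For each line there is 2 lines and i always want the second one
--     for i in range(len(comma_position)):
--         if i % 2 == 0:
--             continue
--
--         # Get the line final position (comma position + 3)
--         line_final_pos = comma_position[i] + 3
--         # Append a string with init and final position
--         statement_lines.append(book[init_position:line_final_pos])
--         # now the final position is the initial position
--         init_position = line_final_pos
--
--     # Strip all the lines and return the list of lines
--     statement_lines = strip_lines(statement_lines)
--     return statement_lines
-- ===== SOURCE B (Python) =====
-- def construct_statement_lines(text):
--     # Consume the book pairwise with str.find: locate the next two commas,
--     # cut 3 past the second, and continue searching after it. No comma list,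
--     # no enumerate, no parity counter.
--     book = "".join(text).replace('\n', ' ')
--     lines = []
--     start = 0
--     search = 0
--     while True:
--         first = book.find(',', search)
--         if first == -1:
--             break
--         second = book.find(',', first + 1)
--         if second == -1:
--             break
--         cut = second + 3
--         lines.append(book[start:cut].strip())
--         start = cut
--         search = second + 1
--     return lines
-- ===== Notes on version B (the rewrite author's own statement) =====
-- stated objective: faster
-- what changed: Replaces A's three staged passes (enumerate every character to collect all comma positions, an index loop over that list keeping the odd-indexed ones, then a separate stripping pass) with a while loop that never materialises a position list: each round locates the next two commas with str.find from a moving offset, cuts 3 past the second, strips and emits that segment immediately, and resumes searching after the second comma.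
import Mathlib
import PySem

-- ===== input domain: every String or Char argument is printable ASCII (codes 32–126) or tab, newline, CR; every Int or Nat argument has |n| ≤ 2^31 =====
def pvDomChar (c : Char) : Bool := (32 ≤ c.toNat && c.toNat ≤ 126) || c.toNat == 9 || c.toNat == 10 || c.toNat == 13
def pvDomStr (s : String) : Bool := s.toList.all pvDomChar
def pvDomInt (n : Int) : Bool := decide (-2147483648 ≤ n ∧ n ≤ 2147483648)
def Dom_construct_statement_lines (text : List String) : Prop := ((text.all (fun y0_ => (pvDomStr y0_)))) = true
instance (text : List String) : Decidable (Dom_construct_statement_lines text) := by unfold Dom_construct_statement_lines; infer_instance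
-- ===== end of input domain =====

-- B replaces A's three staged passes (collect every comma position, keep the odd-indexed
-- ones, strip afterwards) by a find-driven while loop that locates the next two commas
-- and emits each stripped segment immediately; same return value, proved below.

-- ===== PORT A =====
def pyFindCommas (book : String) : List Int :=
  (PySem.List.enumerate book.toList 0).foldl
    (fun acc p => if p.2 == ',' then acc ++ [p.1] else acc) []

def pyTextToBook (text : List String) : String :=
  PySem.Str.replace (PySem.Str.join "" text) "\n" " "

def pyStripLines (lines : List String) : List String :=
  lines.foldl (fun acc l => acc ++ [PySem.Str.strip l]) []

def construct_statement_lines (text : List String) : List String :=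
  let book := pyTextToBook text
  let commaPos := pyFindCommas book
  let r := (PySem.List.pyRange 0 (PySem.List.len commaPos) 1).foldl
    (fun st i =>
      if PySem.Int.mod i 2 = 0 then st
      else (st.1 ++ [PySem.Str.slice book (some st.2)
              (some (PySem.List.pyGetD commaPos i 0 + 3))],
            PySem.List.pyGetD commaPos i 0 + 3))
    (([] : List String), (0 : Int))
  pyStripLines r.1

-- ===== PORT B =====
-- The 'while True' loop of Source B; fuel only makes the recursion total (the loop itself
-- always terminates because the search offset strictly grows), it never changes a value
-- actually reached.
def pyScan (book : String) : Nat → List String → Int → Int → List String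
  | 0, lines, _, _ => lines
  | fuel + 1, lines, start, search =>
    let first := PySem.Str.findFrom book "," search none
    if first = -1 then lines
    else
      let second := PySem.Str.findFrom book "," (first + 1) none
      if second = -1 then lines
      else
        pyScan book fuel
          (lines ++ [PySem.Str.strip (PySem.Str.slice book (some start) (some (second + 3)))])
          (second + 3) (second + 1)

def construct_statement_lines_alt (text : List String) : List String :=
  let book := PySem.Str.replace (PySem.Str.join "" text) "\n" " "
  pyScan book (book.toList.length + 1) [] 0 0

-- ===== PRECONDITION & SPEC =====
def Spec_construct_statement_lines (text : List String) (out : List String) : Prop := out = construct_statement_lines_alt text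
instance (text : List String) (out : List String) : Decidable (Spec_construct_statement_lines text out) := by unfold Spec_construct_statement_lines; infer_instance

-- ===== CLAIM (what is proved, stated in full; the proofs are below) =====
def Claim_equal_construct_statement_lines : Prop := ∀ (text : List String), Dom_construct_statement_lines text → Spec_construct_statement_lines text (construct_statement_lines text)

-- ===== LEMMAS AND PROOFS =====

-- A's loop body, as a step on (lines, init_position) at an (index, comma_position) pair.
def pvStepA (book : String) (st : List String × Int) (p : Int × Int) : List String × Int :=
  if PySem.Int.mod p.1 2 = 0 then st
  else (st.1 ++ [PySem.Str.slice book (some st.2) (some (p.2 + 3))], p.2 + 3)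

-- The common result: unstripped segments cut 3 past every second listed comma position.
def pvSegs (book : String) : List Int → Int → List String
  | [], _ => []
  | [_], _ => []
  | _ :: b :: rest, s => PySem.Str.slice book (some s) (some (b + 3)) :: pvSegs book rest (b + 3)

def pvEnd : List Int → Int → Int
  | [], s => s
  | [_], s => s
  | _ :: b :: rest, _ => pvEnd rest (b + 3)

def pvCommas (l : List Char) (k : Int) : List Int :=
  ((PySem.List.enumerate l k).filter (fun p => p.2 == ',')).map (·.1)

-- comma positions as Nat offsets into the list
def pvCommasN : List Char → List Nat
  | [] => []
  | c :: t => if c = ',' then 0 :: (pvCommasN t).map (· + 1) else (pvCommasN t).map (· + 1)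

theorem pvSegs_head_irrel (book : String) (a b : Int) (P : List Int) (s : Int) :
    pvSegs book (a :: P) s = pvSegs book (b :: P) s := by
  cases P <;> rfl

theorem pvEnd_head_irrel (a b : Int) (P : List Int) (s : Int) :
    pvEnd (a :: P) s = pvEnd (b :: P) s := by
  cases P <;> rfl

theorem pvCommas_cons (c : Char) (l : List Char) (k : Int) :
    pvCommas (c :: l) k =
      if c == ',' then k :: pvCommas l (k + 1) else pvCommas l (k + 1) := by
  simp only [pvCommas, PySem.List.enumerate_cons, List.filter_cons]
  split <;> simp_all

theorem pvCommas_eq_N (l : List Char) : ∀ (k : Int),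
    pvCommas l k = (pvCommasN l).map (fun i : Nat => k + (i : Int)) := by
  induction l with
  | nil => intro k; simp [pvCommas, pvCommasN, PySem.List.enumerate_nil]
  | cons c t ih =>
    intro k
    rw [pvCommas_cons, pvCommasN]
    by_cases hc : c = ','
    · rw [if_pos (by simpa using hc), if_pos hc, ih (k + 1)]
      simp only [List.map_cons, List.map_map, List.cons.injEq, Nat.cast_zero]
      refine ⟨by ring, List.map_congr_left fun i _ => ?_⟩
      simp only [Function.comp_apply]; push_cast; ring
    · rw [if_neg (by simpa using hc), if_neg hc, ih (k + 1)]
      simp only [List.map_map]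
      exact List.map_congr_left fun i _ => by
        simp only [Function.comp_apply]; push_cast; ring

theorem pvLemA (book : String) (P : List Int) :
    ∀ (n : Int) (acc : List String) (s : Int),
      ((PySem.List.enumerate P (2 * n)).foldl (pvStepA book) (acc, s)
          = (acc ++ pvSegs book P s, pvEnd P s)) ∧
      ((PySem.List.enumerate P (2 * n + 1)).foldl (pvStepA book) (acc, s)
          = (acc ++ pvSegs book (0 :: P) s, pvEnd (0 :: P) s)) := by
  induction P with
  | nil => intro n acc s; simp [PySem.List.enumerate_nil, pvSegs, pvEnd]
  | cons a rest ih =>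
    intro n acc s
    constructor
    · rw [PySem.List.enumerate_cons, List.foldl_cons]
      have h0 : pvStepA book (acc, s) (2 * n, a) = (acc, s) := by
        simp [pvStepA]
      rw [h0, (ih n acc s).2, pvSegs_head_irrel book 0 a, pvEnd_head_irrel 0 a]
    · rw [PySem.List.enumerate_cons, List.foldl_cons]
      have h1 : pvStepA book (acc, s) (2 * n + 1, a)
          = (acc ++ [PySem.Str.slice book (some s) (some (a + 3))], a + 3) := by
        simp [pvStepA]
      have h2 : 2 * n + 1 + 1 = 2 * (n + 1) := by ring
      rw [h1, h2, (ih (n + 1) _ _).1]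
      simp [pvSegs, pvEnd]

theorem pvFindCommas_eq (book : String) :
    pyFindCommas book = pvCommas book.toList 0 := by
  unfold pyFindCommas pvCommas
  have h := PySem.List.foldl_append_if (fun p : Int × Char => (p.2 == ','))
    (fun p => p.1) (PySem.List.enumerate book.toList 0) []
  simpa using h

theorem pvALoop (book : String) (P : List Int) :
    pyStripLines (((PySem.List.pyRange 0 (PySem.List.len P) 1).foldl
      (fun st i =>
        if PySem.Int.mod i 2 = 0 then st
        else (st.1 ++ [PySem.Str.slice book (some st.2)
                (some (PySem.List.pyGetD P i 0 + 3))],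
              PySem.List.pyGetD P i 0 + 3))
      (([] : List String), (0 : Int))).1)
    = (pvSegs book P 0).map PySem.Str.strip := by
  have h1 : (PySem.List.pyRange 0 (PySem.List.len P) 1).foldl
      (fun st i =>
        if PySem.Int.mod i 2 = 0 then st
        else (st.1 ++ [PySem.Str.slice book (some st.2)
                (some (PySem.List.pyGetD P i 0 + 3))],
              PySem.List.pyGetD P i 0 + 3))
      (([] : List String), (0 : Int))
      = (PySem.List.enumerate P 0).foldl (pvStepA book)
        (([] : List String), (0 : Int)) := by
    rw [PySem.List.enumerate_eq_map_pyRange P 0, List.foldl_map]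
    rfl
  have h2 := (pvLemA book P 0 [] 0).1
  rw [show (2 : Int) * 0 = 0 by ring] at h2
  rw [h1, h2]
  simp only [List.nil_append]
  unfold pyStripLines
  exact (PySem.List.foldl_append_singleton_eq_map PySem.Str.strip _ []).trans (by simp)

theorem pvA_eq (text : List String) :
    construct_statement_lines text =
      (pvSegs (pyTextToBook text) (pvCommas (pyTextToBook text).toList 0) 0).map
        PySem.Str.strip := by
  simp only [construct_statement_lines]
  rw [pvFindCommas_eq]
  exact pvALoop (pyTextToBook text) (pvCommas (pyTextToBook text).toList 0)

-- ===== B-side lemmas =====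

theorem pvCommasN_not_mem (l : List Char) (h : pvCommasN l = []) : ',' ∉ l := by
  induction l with
  | nil => simp
  | cons c t ih =>
    rw [pvCommasN] at h
    by_cases hc : c = ','
    · rw [if_pos hc] at h; simp at h
    · rw [if_neg hc] at h
      simp only [List.map_eq_nil_iff] at h
      simp only [List.mem_cons]
      rintro (rfl | hm)
      · exact hc rfl
      · exact ih h hm

theorem pvCommasN_length_le (l : List Char) : (pvCommasN l).length ≤ l.length := by
  induction l with
  | nil => simp [pvCommasN]
  | cons c t ih =>
    rw [pvCommasN]
    split <;> simp <;> omega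

theorem pvCommasN_head_spec (l : List Char) : ∀ (i : Nat) (rest : List Nat),
    pvCommasN l = i :: rest →
    i < l.length ∧ l.drop i = ',' :: l.drop (i + 1) ∧
      (∀ j, j < i → l[j]? ≠ some ',') ∧
      rest = (pvCommasN (l.drop (i + 1))).map (· + (i + 1)) := by
  induction l with
  | nil => intro i rest h; simp [pvCommasN] at h
  | cons c t ih =>
    intro i rest h
    rw [pvCommasN] at h
    by_cases hc : c = ','
    · rw [if_pos hc] at h
      obtain ⟨h0, hrest⟩ := List.cons.inj h
      subst h0
      refine ⟨by simp, by simp [hc], by omega, by simpa using hrest.symm⟩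
    · rw [if_neg hc] at h
      obtain ⟨i', rest', hsplit, hfi, hmap⟩ := List.map_eq_cons_iff.mp h
      subst hfi
      obtain ⟨h1, h2, h3, h4⟩ := ih i' rest' hsplit
      refine ⟨by simpa using Nat.succ_lt_succ h1, ?_, ?_, ?_⟩
      · simpa using h2
      · intro j hj
        cases j with
        | zero => simpa using hc
        | succ j' => simpa using h3 j' (by omega)
      · rw [← hmap, h4]
        simp only [List.map_map, List.drop_succ_cons]
        exact List.map_congr_left fun x _ => by simp only [Function.comp_apply]; omega

theorem pvSingletonPrefix (xs : List Char) (c : Char) (h : [c] <+: xs) : xs.head? = some c := by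
  obtain ⟨t, rfl⟩ := h; rfl

theorem pvFindChar (l : List Char) :
    PySem.Chars.find l [','] =
      (match pvCommasN l with | [] => (-1 : Int) | i :: _ => (i : Int)) := by
  cases h : pvCommasN l with
  | nil =>
    rw [PySem.Chars.find_eq_neg_one_iff]
    intro hinf
    have hm : ',' ∈ l := by
      have := hinf.sublist.subset
      simp at this
      exact this
    exact pvCommasN_not_mem l h hm
  | cons i rest =>
    obtain ⟨hlt, hdrop, hmin, -⟩ := pvCommasN_head_spec l i rest h
    have hpref : [','] <+: l.drop i := ⟨l.drop (i + 1), by rw [hdrop]; rfl⟩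
    have hinf : PySem.Chars.isIn [','] l = true :=
      (PySem.Chars.exists_prefix_drop_iff_isIn ..).mp ⟨i, hpref⟩
    have hnn : 0 ≤ PySem.Chars.find l [','] :=
      (PySem.Chars.find_nonneg_iff ..).mpr ((PySem.Chars.isIn_iff_infix ..).mp hinf)
    obtain ⟨hp, hminf⟩ := PySem.Chars.find_spec hnn
    have heq : (PySem.Chars.find l [',']).toNat = i := by
      rcases Nat.lt_trichotomy (PySem.Chars.find l [',']).toNat i with hl | he | hg
    -- find before i: contradicts minimality of i
      · exfalso
        have := pvSingletonPrefix _ _ hp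
        rw [List.head?_drop] at this
        exact hmin _ hl this
      · exact he
      · exact absurd hpref (hminf i hg)
    show PySem.Chars.find l [','] = (i : Int)
    omega

theorem pvFindFrom (book : String) (k : Nat) (hk : k ≤ book.toList.length) :
    PySem.Str.findFrom book "," (k : Int) none =
      (match pvCommasN (book.toList.drop k) with
       | [] => (-1 : Int) | i :: _ => ((k + i : Nat) : Int)) := by
  have hsub : (",".toList) = [','] := rfl
  rw [PySem.Str.findFrom_eq, hsub, PySem.Chars.findFrom_natCast _ _ k hk,
    pvFindChar (book.toList.drop k)]
  cases h : pvCommasN (book.toList.drop k) with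
  | nil => simp
  | cons i rest =>
    have hne : ((i : Int)) ≠ -1 := by omega
    simp only [if_neg hne]
    push_cast
    ring

theorem pvScanLem (book : String) : ∀ (fuel : Nat) (k : Nat) (lines : List String) (start : Int),
    k ≤ book.toList.length →
    (pvCommasN (book.toList.drop k)).length ≤ 2 * fuel →
    pyScan book fuel lines start (k : Int)
      = lines ++ (pvSegs book (pvCommas (book.toList.drop k) (k : Int)) start).map PySem.Str.strip := by
  intro fuel
  induction fuel with
  | zero =>
    intro k lines start hk hlen
    have h0 : pvCommasN (book.toList.drop k) = [] := by
      cases h : pvCommasN (book.toList.drop k) with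
      | nil => rfl
      | cons a b => rw [h] at hlen; simp at hlen
    rw [pvCommas_eq_N, h0]
    simp [pyScan, pvSegs]
  | succ fuel ih =>
    intro k lines start hk hlen
    rw [pyScan]
    cases h : pvCommasN (book.toList.drop k) with
    | nil =>
      have hfirst : PySem.Str.findFrom book "," (k : Int) none = -1 := by
        rw [pvFindFrom book k hk, h]
      rw [hfirst, if_pos rfl, pvCommas_eq_N, h]
      simp [pvSegs]
    | cons i rest =>
      obtain ⟨hi_lt, -, -, hrest⟩ := pvCommasN_head_spec _ i rest h
      have hlen1 : (book.toList.drop k).length = book.toList.length - k := by simp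
      have hk2 : k + i + 1 ≤ book.toList.length := by omega
      have hfirst : PySem.Str.findFrom book "," (k : Int) none = ((k + i : Nat) : Int) := by
        rw [pvFindFrom book k hk, h]
      have hne1 : ((k + i : Nat) : Int) ≠ -1 := by omega
      have hcast1 : ((k + i : Nat) : Int) + 1 = ((k + i + 1 : Nat) : Int) := by push_cast; ring
      have hdd : (book.toList.drop k).drop (i + 1) = book.toList.drop (k + i + 1) := by
        have e : k + (i + 1) = k + i + 1 := by omega
        rw [List.drop_drop, e]
      rw [hfirst, if_neg hne1, hcast1]
      cases hq : pvCommasN (book.toList.drop (k + i + 1)) with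
      | nil =>
        have hsecond : PySem.Str.findFrom book "," ((k + i + 1 : Nat) : Int) none = -1 := by
          rw [pvFindFrom book (k + i + 1) hk2, hq]
        have hrest0 : rest = [] := by rw [hrest, hdd, hq]; rfl
        rw [hsecond, if_pos rfl, pvCommas_eq_N, h, hrest0]
        simp [pvSegs]
      | cons j rest2 =>
        obtain ⟨hj_lt, -, -, hrest2⟩ := pvCommasN_head_spec _ j rest2 hq
        have hlen2 : (book.toList.drop (k + i + 1)).length = book.toList.length - (k + i + 1) := by
          simp
        have hsecond : PySem.Str.findFrom book "," ((k + i + 1 : Nat) : Int) none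
            = ((k + i + 1 + j : Nat) : Int) := by
          rw [pvFindFrom book (k + i + 1) hk2, hq]
        have hne2 : ((k + i + 1 + j : Nat) : Int) ≠ -1 := by omega
        have hk' : k + i + 1 + j + 1 ≤ book.toList.length := by omega
        have hdd2 : (book.toList.drop (k + i + 1)).drop (j + 1)
            = book.toList.drop (k + i + 1 + j + 1) := by
          have e : k + i + 1 + (j + 1) = k + i + 1 + j + 1 := by omega
          rw [List.drop_drop, e]
        have hlen' : (pvCommasN (book.toList.drop (k + i + 1 + j + 1))).length ≤ 2 * fuel := by
          have e1 : rest.length = rest2.length + 1 := by rw [hrest, hdd, hq]; simp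
          have e2 : rest2.length = (pvCommasN (book.toList.drop (k + i + 1 + j + 1))).length := by
            rw [hrest2, hdd2]; simp
          rw [h] at hlen; simp only [List.length_cons] at hlen
          omega
        have hcast2 : ((k + i + 1 + j : Nat) : Int) + 1 = ((k + i + 1 + j + 1 : Nat) : Int) := by
          push_cast; ring
        rw [hsecond, if_neg hne2, hcast2, ih (k + i + 1 + j + 1) _ _ hk' hlen']
        -- identify the two comma lists and unfold one pvSegs step
        rw [pvCommas_eq_N (book.toList.drop k) (k : Int), h, hrest, hdd, hq,
          pvCommas_eq_N (book.toList.drop (k + i + 1 + j + 1))]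
        simp only [List.map_cons, List.map_map, pvSegs, hrest2, hdd2]
        have hb : (k : Int) + ((j + (i + 1) : Nat) : Int) = ((k + i + 1 + j : Nat) : Int) := by
          push_cast; ring
        rw [hb]
        simp only [List.append_assoc, List.singleton_append]
        congr 2
        have hQ : List.map
            ((fun i_1 : Nat => (k : Int) + (i_1 : Int)) ∘ (fun x => x + (i + 1)) ∘ fun x => x + (j + 1))
            (pvCommasN (book.toList.drop (k + i + 1 + j + 1)))
            = List.map (fun i_1 : Nat => ((k + i + 1 + j + 1 : Nat) : Int) + (i_1 : Int))
              (pvCommasN (book.toList.drop (k + i + 1 + j + 1))) :=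
          List.map_congr_left fun x _ => by simp only [Function.comp_apply]; push_cast; ring
        rw [hQ]

theorem pvB_eq (text : List String) :
    construct_statement_lines_alt text =
      (pvSegs (pyTextToBook text) (pvCommas (pyTextToBook text).toList 0) 0).map
        PySem.Str.strip := by
  have hlen : (pvCommasN ((pyTextToBook text).toList.drop 0)).length
      ≤ 2 * ((pyTextToBook text).toList.length + 1) := by
    rw [List.drop_zero]
    have := pvCommasN_length_le (pyTextToBook text).toList
    omega
  have h := pvScanLem (pyTextToBook text) ((pyTextToBook text).toList.length + 1) 0 [] 0
    (by omega) hlen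
  rw [List.drop_zero] at h
  simpa [construct_statement_lines_alt, pyTextToBook] using h

-- ===== VERDICT (by name: the statement is the Claim_ definition above) =====
theorem construct_statement_lines_spec : Claim_equal_construct_statement_lines := by
  intro text _
  unfold Spec_construct_statement_lines
  rw [pvA_eq, pvB_eq]
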